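-- pv_equiv track=rewrite | github.com/YashB63/GFG-Daily-Questions | Day 71/Reversing the equation/reversing_the_equation.py | reverseEqn
-- ===== SOURCE A (Python) =====
-- def reverseEqn(s):
--
--     res, sub = '', ''
--     for i in range(len(s) - 1, -1, -1):
--         if s[i].isdigit():
--             sub += s[i]
--         else:
--             sub = sub[::-1]
--             res += sub
--             res += s[i]
--             sub = ''
--
--     sub = sub[::-1]
--     res += sub
--     return res
-- ===== SOURCE B (Python) =====
-- def reverseEqn(s):
--     tokens = []
--     i = 0
--     n = len(s)
--     while i < n:
--         if s[i].isdigit():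
--             j = i
--             while j < n and s[j].isdigit():
--                 j += 1
--             tokens.append(s[i:j])
--             i = j
--         else:
--             tokens.append(s[i])
--             i += 1
--     return ''.join(reversed(tokens))
-- ===== Notes on version B (the rewrite author's own statement) =====
-- stated objective: simpler
-- what changed: B tokenizes left-to-right into digit-run and single-character tokens and joins the reversed token list, instead of A's right-to-left scan that accumulates a digit buffer and re-reverses it at each non-digit.
import Mathlib
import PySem

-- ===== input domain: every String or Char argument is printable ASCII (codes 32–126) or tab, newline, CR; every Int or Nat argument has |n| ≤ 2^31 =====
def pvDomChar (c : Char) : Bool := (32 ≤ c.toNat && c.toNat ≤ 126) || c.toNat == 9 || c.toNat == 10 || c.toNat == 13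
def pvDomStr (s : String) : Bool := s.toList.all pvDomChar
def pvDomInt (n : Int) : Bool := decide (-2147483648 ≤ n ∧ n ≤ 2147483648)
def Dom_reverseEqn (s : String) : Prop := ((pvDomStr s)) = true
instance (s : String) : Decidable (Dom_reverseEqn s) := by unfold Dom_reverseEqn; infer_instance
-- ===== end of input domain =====

-- B tokenizes left-to-right into digit-run / single-char tokens and joins the reversed token
-- list, instead of A's right-to-left scan with a digit buffer reversed at each non-digit (objective: simpler).

-- ===== PORT A =====
-- one step of A's loop body, state (res, sub); the loop runs over the characters from the end,
-- i.e. a fold over s.toList.reverse (range(len(s)-1,-1,-1) visits exactly those characters)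
def reverseEqnStep (st : List Char × List Char) (c : Char) : List Char × List Char :=
  if PySem.Chars.isdigit c then (st.1, st.2 ++ [c])
  else (st.1 ++ st.2.reverse ++ [c], [])

def reverseEqn (s : String) : String :=
  let st := s.toList.reverse.foldl reverseEqnStep ([], [])
  String.ofList (st.1 ++ st.2.reverse)

-- ===== PORT B =====
-- left-to-right tokenizer: a maximal digit run is one token, any other char its own token
def reverseEqnTokens : List Char → List (List Char)
  | [] => []
  | c :: t =>
    if PySem.Chars.isdigit c then
      (c :: t.takeWhile PySem.Chars.isdigit) :: reverseEqnTokens (t.dropWhile PySem.Chars.isdigit)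
    else
      [c] :: reverseEqnTokens t
termination_by l => l.length
decreasing_by
  · simp only [List.length_cons]
    exact Nat.lt_succ_of_le (List.length_dropWhile_le _ _)
  · simp

def reverseEqn_alt (s : String) : String :=
  String.ofList ((reverseEqnTokens s.toList).reverse.flatten)

-- ===== PRECONDITION & SPEC =====
def Spec_reverseEqn (s : String) (out : String) : Prop := out = reverseEqn_alt s
instance (s : String) (out : String) : Decidable (Spec_reverseEqn s out) := by unfold Spec_reverseEqn; infer_instance

-- ===== CLAIM (what is proved, stated in full; the proofs are below) =====
def Claim_equal_reverseEqn : Prop := ∀ (s : String), Dom_reverseEqn s → Spec_reverseEqn s (reverseEqn s)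

-- ===== LEMMAS AND PROOFS =====

-- B's value as a function of a char list
def pvB (l : List Char) : List Char := (reverseEqnTokens l).reverse.flatten

lemma pvB_nil : pvB [] = [] := by simp [pvB, reverseEqnTokens]

lemma pvB_cons_nondigit (c : Char) (t : List Char) (h : PySem.Chars.isdigit c = false) :
    pvB (c :: t) = pvB t ++ [c] := by
  simp [pvB, reverseEqnTokens, h]

-- B on a string that starts with its digit run stripped, then the run back: pvB l
lemma pvB_drop_take (l : List Char) :
    pvB l = pvB (l.dropWhile PySem.Chars.isdigit) ++ l.takeWhile PySem.Chars.isdigit := by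
  cases l with
  | nil => simp [pvB_nil]
  | cons c t =>
    by_cases h : PySem.Chars.isdigit c = true
    · simp [pvB, reverseEqnTokens, h]
    · simp [eq_false_of_ne_true h]

-- loop invariant: the fold over the reversed list, seen as a foldr over l, keeps
-- sub = reverse of l's leading digit run and res = B of the rest
lemma reverseEqn_fold_eq (l : List Char) :
    l.reverse.foldl reverseEqnStep ([], []) =
      (pvB (l.dropWhile PySem.Chars.isdigit), (l.takeWhile PySem.Chars.isdigit).reverse) := by
  induction l with
  | nil => simp [pvB_nil]
  | cons c t ih =>
    have : (c :: t).reverse.foldl reverseEqnStep ([], []) =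
        reverseEqnStep (t.reverse.foldl reverseEqnStep ([], [])) c := by
      simp [List.reverse_cons, List.foldl_append]
    rw [this, ih]
    by_cases h : PySem.Chars.isdigit c = true
    · simp [reverseEqnStep, h]
    · have h' : PySem.Chars.isdigit c = false := eq_false_of_ne_true h
      simp only [reverseEqnStep, h', List.takeWhile_cons, List.dropWhile_cons,
        Bool.false_eq_true, if_false, List.reverse_reverse, List.reverse_nil]
      rw [pvB_cons_nondigit c t h', pvB_drop_take t]

-- ===== VERDICT (by name: the statement is the Claim_ definition above) =====
theorem reverseEqn_spec : Claim_equal_reverseEqn := by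
  intro s _
  unfold Spec_reverseEqn reverseEqn reverseEqn_alt
  rw [reverseEqn_fold_eq]
  rw [show ((reverseEqnTokens s.toList).reverse.flatten : List Char) = pvB s.toList from rfl]
  rw [pvB_drop_take s.toList]
  simp
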